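-- pv_equiv track=rewrite | github.com/nilsbjorklin/advent-of-code | src/2020/16/part_2.py | trim_rules
-- ===== SOURCE A (Python) =====
-- def trim_rules(found_columns, column_to_rule, rule_to_column):
--     for found_column, found_rule in found_columns:
--         if found_column in column_to_rule:
--             del column_to_rule[found_column]
--         if found_rule in rule_to_column:
--             del rule_to_column[found_rule]
--         for column, rules_for_column in column_to_rule.items():
--             if found_rule in rules_for_column:
--                 rules_for_column.remove(found_rule)
--                 column_to_rule[column] = rules_for_column
--         for rule, columns_for_rule in rule_to_column.items():
--             if found_column in columns_for_rule:
--                 columns_for_rule.remove(found_column)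
--                 rule_to_column[rule] = columns_for_rule
--     return column_to_rule, rule_to_column
-- ===== SOURCE B (Python) =====
-- def trim_rules(found_columns, column_to_rule, rule_to_column):
--     # One pass over found_columns builds occurrence counters; each map is then
--     # rebuilt in a single pass (A rescans every entry per found pair).
--     # Note: A mutates its dict/list arguments in place; B leaves them untouched
--     # and returns fresh dicts (equal as return values).
--     col_cnt = {}
--     rule_cnt = {}
--     for c, r in found_columns:
--         col_cnt[c] = col_cnt.get(c, 0) + 1
--         rule_cnt[r] = rule_cnt.get(r, 0) + 1
--
--     def prune(values, cnt):
--         remaining = dict(cnt)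
--         out = []
--         for v in values:
--             k = remaining.get(v, 0)
--             if k > 0:
--                 remaining[v] = k - 1
--             else:
--                 out.append(v)
--         return out
--
--     new_column_to_rule = {c: prune(rules, rule_cnt)
--                           for c, rules in column_to_rule.items() if c not in col_cnt}
--     new_rule_to_column = {r: prune(cols, col_cnt)
--                           for r, cols in rule_to_column.items() if r not in rule_cnt}
--     return new_column_to_rule, new_rule_to_column
-- ===== Notes on version B (the rewrite author's own statement) =====
-- stated objective: faster
-- what changed: A rescans every remaining map entry (and its value list) once per found pair; B builds column/rule occurrence counters in one pass over found_columns and then rebuilds each map in a single pass, dropping counted occurrences, so the per-pair rescans disappear (A mutates its dict/list arguments in place, B leaves them untouched; return values are equal).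
import Mathlib
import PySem

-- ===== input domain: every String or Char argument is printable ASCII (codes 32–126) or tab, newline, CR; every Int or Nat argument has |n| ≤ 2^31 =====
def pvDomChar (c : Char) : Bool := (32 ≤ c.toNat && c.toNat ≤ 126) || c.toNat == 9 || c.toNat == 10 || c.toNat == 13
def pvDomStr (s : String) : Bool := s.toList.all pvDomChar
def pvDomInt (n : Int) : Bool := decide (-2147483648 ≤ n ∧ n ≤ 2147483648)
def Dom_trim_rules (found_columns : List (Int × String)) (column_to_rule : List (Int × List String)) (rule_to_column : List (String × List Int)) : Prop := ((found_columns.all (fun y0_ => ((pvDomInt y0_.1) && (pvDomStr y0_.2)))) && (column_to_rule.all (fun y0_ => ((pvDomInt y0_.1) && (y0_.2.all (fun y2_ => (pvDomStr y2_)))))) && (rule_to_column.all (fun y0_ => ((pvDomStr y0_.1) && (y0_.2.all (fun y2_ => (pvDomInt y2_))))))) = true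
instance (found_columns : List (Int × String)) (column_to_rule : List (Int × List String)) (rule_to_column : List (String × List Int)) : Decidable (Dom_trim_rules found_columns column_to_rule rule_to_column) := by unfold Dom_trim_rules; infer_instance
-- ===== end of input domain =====

-- B replaces A's rescan of every map entry per found pair by occurrence counters built in
-- one pass, rebuilding each map once (return values equal; A mutates its arguments, B does not).

-- ===== PORT A =====
-- The dict arguments arrive as association lists; both ports realise them as PySem.Dict
-- via Dict.ofList (Python's dict construction: first-key position, last value wins).
-- In A, `d[column] = rules` reassigns each EXISTING key in place while iterating items(),
-- i.e. the inner loop maps every entry's value list (keys are unique); `list.remove`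
-- under the `in` guard removes the first occurrence, i.e. List.erase.
def trim_rules (found_columns : List (Int × String)) (column_to_rule : List (Int × List String)) (rule_to_column : List (String × List Int)) : (List (Int × List String)) × (List (String × List Int)) :=
  let init : PySem.Dict Int (List String) × PySem.Dict String (List Int) :=
    (PySem.Dict.ofList column_to_rule, PySem.Dict.ofList rule_to_column)
  let fin := found_columns.foldl (fun st fc =>
    let ctr := if st.1.contains fc.1 then st.1.erase fc.1 else st.1
    let rtc := if st.2.contains fc.2 then st.2.erase fc.2 else st.2
    let ctr := PySem.Dict.mk (ctr.items.map (fun p =>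
      if p.2.contains fc.2 then (p.1, p.2.erase fc.2) else p))
    let rtc := PySem.Dict.mk (rtc.items.map (fun p =>
      if p.2.contains fc.1 then (p.1, p.2.erase fc.1) else p))
    (ctr, rtc)) init
  (fin.1.items, fin.2.items)

-- ===== PORT B =====
-- Source B's prune: copy the counter, walk the values once, dropping a value while its
-- remaining count is positive.
def pvPrune {α : Type} [BEq α] (values : List α) (cnt : PySem.Dict α Int) : List α :=
  (values.foldl (fun (st : PySem.Dict α Int × List α) v =>
      let k := st.1.getD v 0
      if k > 0 then (st.1.insert v (k - 1), st.2) else (st.1, st.2 ++ [v]))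
    (cnt, [])).2

def trim_rules_alt (found_columns : List (Int × String)) (column_to_rule : List (Int × List String)) (rule_to_column : List (String × List Int)) : (List (Int × List String)) × (List (String × List Int)) :=
  let cnts := found_columns.foldl
    (fun (d : PySem.Dict Int Int × PySem.Dict String Int) p =>
      (d.1.insert p.1 (d.1.getD p.1 0 + 1), d.2.insert p.2 (d.2.getD p.2 0 + 1)))
    (PySem.Dict.empty, PySem.Dict.empty)
  let col_cnt := cnts.1
  let rule_cnt := cnts.2
  let new_ctr := ((PySem.Dict.ofList column_to_rule).items.filter
      (fun p => !col_cnt.contains p.1)).map (fun p => (p.1, pvPrune p.2 rule_cnt))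
  let new_rtc := ((PySem.Dict.ofList rule_to_column).items.filter
      (fun p => !rule_cnt.contains p.1)).map (fun p => (p.1, pvPrune p.2 col_cnt))
  (new_ctr, new_rtc)

-- ===== PRECONDITION & SPEC =====
def Spec_trim_rules (found_columns : List (Int × String)) (column_to_rule : List (Int × List String)) (rule_to_column : List (String × List Int)) (out : (List (Int × List String)) × (List (String × List Int))) : Prop := out = trim_rules_alt found_columns column_to_rule rule_to_column
instance (found_columns : List (Int × String)) (column_to_rule : List (Int × List String)) (rule_to_column : List (String × List Int)) (out : (List (Int × List String)) × (List (String × List Int))) : Decidable (Spec_trim_rules found_columns column_to_rule rule_to_column out) := by unfold Spec_trim_rules; infer_instance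

-- ===== CLAIM (what is proved, stated in full; the proofs are below) =====
def Claim_equal_trim_rules : Prop := ∀ (found_columns : List (Int × String)) (column_to_rule : List (Int × List String)) (rule_to_column : List (String × List Int)), Dom_trim_rules found_columns column_to_rule rule_to_column → Spec_trim_rules found_columns column_to_rule rule_to_column (trim_rules found_columns column_to_rule rule_to_column)

-- ===== LEMMAS AND PROOFS =====

def pvDropCnt {α : Type} [DecidableEq α] (f : α → Nat) : List α → List α
  | [] => []
  | x :: xs => if 0 < f x then pvDropCnt (fun y => if y = x then f x - 1 else f y) xs
               else x :: pvDropCnt f xs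

theorem pvDropCnt_bump {α : Type} [DecidableEq α] [BEq α] [LawfulBEq α]
    (v : List α) (f : α → Nat) (r : α) :
    pvDropCnt (fun y => if y = r then f r + 1 else f y) v = pvDropCnt f (v.erase r) := by
  induction v generalizing f with
  | nil => simp [pvDropCnt]
  | cons x xs ih =>
    by_cases hxr : x = r
    · subst hxr
      rw [show (x :: xs).erase x = xs by simp]
      rw [pvDropCnt]
      have hx : (if x = x then f x + 1 else f x) = f x + 1 := if_pos rfl
      rw [hx, if_pos (Nat.succ_pos _)]
      rw [show (fun y => if y = x then f x + 1 - 1 else if y = x then f x + 1 else f y) = f from by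
        funext y; by_cases hy : y = x <;> simp [hy]]
    · rw [show (x :: xs).erase r = x :: xs.erase r by
        simp [beq_eq_false_iff_ne.mpr hxr]]
      rw [pvDropCnt, pvDropCnt]
      simp only [if_neg hxr]
      by_cases hfx : 0 < f x
      · rw [if_pos hfx, if_pos hfx]
        rw [show (fun y => if y = x then f x - 1 else if y = r then f r + 1 else f y)
              = (fun y => if y = r then (fun z => if z = x then f x - 1 else f z) r + 1
                    else (fun z => if z = x then f x - 1 else f z) y) from by
          funext y; by_cases h1 : y = x <;> by_cases h2 : y = r <;> simp_all]
        exact ih _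
      · rw [if_neg hfx, if_neg hfx, ih]

theorem pvDropCnt_zero {α : Type} [DecidableEq α] (v : List α) :
    pvDropCnt (fun _ => 0) v = v := by
  induction v with
  | nil => rfl
  | cons x xs ih => simp [pvDropCnt, ih]

theorem pvFoldl_erase_eq_dropCnt {α : Type} [DecidableEq α] [BEq α] [LawfulBEq α]
    (rs : List α) (v : List α) :
    rs.foldl (fun l x => l.erase x) v = pvDropCnt (fun x => List.count x rs) v := by
  induction rs generalizing v with
  | nil => simp [pvDropCnt_zero]
  | cons r rs ih =>
    rw [List.foldl_cons, ih]
    rw [show (fun x => List.count x (r :: rs))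
          = (fun y => if y = r then (fun x => List.count x rs) r + 1 else (fun x => List.count x rs) y) from by
      funext y; by_cases hy : y = r
      · simp [hy]
      · simp [hy, Ne.symm hy]]
    exact (pvDropCnt_bump _ _ _).symm


theorem pvPrune_loop {α : Type} [DecidableEq α] [BEq α] [LawfulBEq α]
    (v : List α) (d : PySem.Dict α Int) (acc : List α) (f : α → Nat)
    (h : ∀ x, d.getD x 0 = (f x : Int)) :
    (v.foldl (fun (st : PySem.Dict α Int × List α) v =>
      let k := st.1.getD v 0
      if k > 0 then (st.1.insert v (k - 1), st.2) else (st.1, st.2 ++ [v]))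
    (d, acc)).2 = acc ++ pvDropCnt f v := by
  induction v generalizing d acc f with
  | nil => simp [pvDropCnt]
  | cons x xs ih =>
    rw [List.foldl_cons, pvDropCnt]
    simp only [h x]
    by_cases hfx : 0 < f x
    · rw [if_pos (by exact_mod_cast hfx), if_pos hfx]
      exact ih _ _ _ (fun y => by
        rw [PySem.Dict.getD_insert, h y]
        by_cases hy : y = x
        · subst hy; rw [if_pos rfl, if_pos rfl]; omega
        · rw [if_neg hy, if_neg hy])
    · rw [if_neg (by exact_mod_cast hfx), if_neg hfx]
      rw [ih _ _ _ h]
      simp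

theorem pvPrune_eq_foldl_erase {α : Type} [DecidableEq α] [BEq α] [LawfulBEq α]
    (v : List α) (rs : List α) :
    pvPrune v (PySem.Dict.counter rs) = rs.foldl (fun l x => l.erase x) v := by
  rw [pvFoldl_erase_eq_dropCnt, pvPrune]
  exact pvPrune_loop v _ [] _ (fun x => PySem.Dict.getD_counter rs x)

theorem pvAstep_items {κ β : Type} [BEq κ] [BEq β] [LawfulBEq β]
    (d : PySem.Dict κ (List β)) (k : κ) (x : β) :
    (PySem.Dict.mk ((if d.contains k then d.erase k else d).items.map (fun p =>
        if p.2.contains x then (p.1, p.2.erase x) else p))).items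
    = (d.items.filter (fun p => !(p.1 == k))).map (fun p => (p.1, p.2.erase x)) := by
  have h1 : (if d.contains k then d.erase k else d).items
      = d.items.filter (fun p => !(p.1 == k)) := by
    by_cases hc : d.contains k
    · rw [if_pos hc]; rfl
    · rw [if_neg hc]
      refine (List.filter_eq_self.mpr ?_).symm
      intro p hp
      have : (p.1 == k) = false := by
        by_contra hne
        exact hc (List.any_eq_true.mpr ⟨p, hp, by simpa using hne⟩)
      simp [this]
  rw [show (PySem.Dict.mk ((if d.contains k then d.erase k else d).items.map (fun p =>
        if p.2.contains x then (p.1, p.2.erase x) else p))).items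
      = (if d.contains k then d.erase k else d).items.map (fun p =>
        if p.2.contains x then (p.1, p.2.erase x) else p) from rfl]
  rw [h1]
  refine List.map_congr_left ?_
  intro p _
  by_cases hx : p.2.contains x
  · rw [if_pos hx]
  · rw [if_neg hx, List.erase_of_not_mem (by simpa using hx)]

theorem pvAfold_items {κ β : Type} [BEq κ] [BEq β] [LawfulBEq β]
    (qs : List (κ × β)) (d : PySem.Dict κ (List β)) :
    (qs.foldl (fun d q =>
        PySem.Dict.mk ((if d.contains q.1 then d.erase q.1 else d).items.map (fun p =>
          if p.2.contains q.2 then (p.1, p.2.erase q.2) else p))) d).items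
    = (d.items.filter (fun p => !(qs.map (·.1)).contains p.1)).map
        (fun p => (p.1, (qs.map (·.2)).foldl (fun l x => l.erase x) p.2)) := by
  induction qs generalizing d with
  | nil => simp
  | cons q qs ih =>
    rw [List.foldl_cons, ih]
    rw [pvAstep_items d q.1 q.2]
    rw [List.filter_map, List.map_map, List.filter_filter]
    refine congrArg _ (List.filter_congr ?_)
    intro p _
    simp [List.contains_cons, Bool.and_comm]


theorem trim_rules_eq_alt (fcs : List (Int × String)) (ctr : List (Int × List String))
    (rtc : List (String × List Int)) :
    trim_rules fcs ctr rtc = trim_rules_alt fcs ctr rtc := by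
  simp only [trim_rules, trim_rules_alt]
  have h1 : List.foldl (fun (st : PySem.Dict Int (List String) × PySem.Dict String (List Int)) fc =>
        (PySem.Dict.mk ((if st.1.contains fc.1 then st.1.erase fc.1 else st.1).items.map (fun p =>
            if p.2.contains fc.2 then (p.1, p.2.erase fc.2) else p)),
         PySem.Dict.mk ((if st.2.contains fc.2 then st.2.erase fc.2 else st.2).items.map (fun p =>
            if p.2.contains fc.1 then (p.1, p.2.erase fc.1) else p))))
      (PySem.Dict.ofList ctr, PySem.Dict.ofList rtc) fcs
      = (List.foldl (fun d fc =>
          PySem.Dict.mk ((if PySem.Dict.contains d fc.1 then PySem.Dict.erase d fc.1 else d).items.map (fun p =>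
            if p.2.contains fc.2 then (p.1, p.2.erase fc.2) else p))) (PySem.Dict.ofList ctr) fcs,
         List.foldl (fun d fc =>
          PySem.Dict.mk ((if PySem.Dict.contains d fc.2 then PySem.Dict.erase d fc.2 else d).items.map (fun p =>
            if p.2.contains fc.1 then (p.1, p.2.erase fc.1) else p))) (PySem.Dict.ofList rtc) fcs) :=
    PySem.List.foldl_prod_mk
      (fun (d : PySem.Dict Int (List String)) (fc : Int × String) =>
        PySem.Dict.mk ((if PySem.Dict.contains d fc.1 then PySem.Dict.erase d fc.1 else d).items.map (fun p =>
            if p.2.contains fc.2 then (p.1, p.2.erase fc.2) else p)))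
      (fun (d : PySem.Dict String (List Int)) (fc : Int × String) =>
        PySem.Dict.mk ((if PySem.Dict.contains d fc.2 then PySem.Dict.erase d fc.2 else d).items.map (fun p =>
            if p.2.contains fc.1 then (p.1, p.2.erase fc.1) else p))) fcs _ _
  have h2 : List.foldl (fun (d : PySem.Dict Int Int × PySem.Dict String Int) p =>
        (d.1.insert p.1 (d.1.getD p.1 0 + 1), d.2.insert p.2 (d.2.getD p.2 0 + 1)))
      (PySem.Dict.empty, PySem.Dict.empty) fcs
      = (List.foldl (fun (d : PySem.Dict Int Int) p => d.insert p.1 (d.getD p.1 0 + 1))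
          PySem.Dict.empty fcs,
         List.foldl (fun (d : PySem.Dict String Int) p => d.insert p.2 (d.getD p.2 0 + 1))
          PySem.Dict.empty fcs) :=
    PySem.List.foldl_prod_mk
      (fun (d : PySem.Dict Int Int) (p : Int × String) => d.insert p.1 (d.getD p.1 0 + 1))
      (fun (d : PySem.Dict String Int) (p : Int × String) => d.insert p.2 (d.getD p.2 0 + 1)) fcs _ _
  rw [h1, h2]
  have hc1 : fcs.foldl (fun (d : PySem.Dict Int Int) fc => d.insert fc.1 (d.getD fc.1 0 + 1))
      PySem.Dict.empty = PySem.Dict.counter (fcs.map (·.1)) := by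
    rw [← PySem.Dict.foldl_insert_getD_add_one_eq_counter, List.foldl_map]
  have hc2 : fcs.foldl (fun (d : PySem.Dict String Int) fc => d.insert fc.2 (d.getD fc.2 0 + 1))
      PySem.Dict.empty = PySem.Dict.counter (fcs.map (·.2)) := by
    rw [← PySem.Dict.foldl_insert_getD_add_one_eq_counter, List.foldl_map]
  rw [hc1, hc2]
  refine Prod.ext ?_ ?_
  · show (fcs.foldl _ (PySem.Dict.ofList ctr)).items = _
    rw [pvAfold_items fcs (PySem.Dict.ofList ctr)]
    refine congrArg _ ?_ |>.trans (List.map_congr_left ?_)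
    · exact List.filter_congr (fun p _ => by rw [PySem.Dict.contains_counter])
    · intro p _
      rw [pvPrune_eq_foldl_erase]
  · show (fcs.foldl _ (PySem.Dict.ofList rtc)).items = _
    rw [show fcs.foldl (fun d (fc : Int × String) =>
        PySem.Dict.mk ((if PySem.Dict.contains d fc.2 then PySem.Dict.erase d fc.2 else d).items.map (fun p =>
          if p.2.contains fc.1 then (p.1, p.2.erase fc.1) else p))) (PySem.Dict.ofList rtc)
      = (fcs.map (fun fc => (fc.2, fc.1))).foldl (fun d q =>
        PySem.Dict.mk ((if PySem.Dict.contains d q.1 then PySem.Dict.erase d q.1 else d).items.map (fun p =>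
          if p.2.contains q.2 then (p.1, p.2.erase q.2) else p))) (PySem.Dict.ofList rtc) from
      (List.foldl_map
        (f := fun (fc : Int × String) => (fc.2, fc.1))
        (g := fun (d : PySem.Dict String (List Int)) (q : String × Int) =>
          PySem.Dict.mk ((if PySem.Dict.contains d q.1 then PySem.Dict.erase d q.1 else d).items.map (fun p =>
            if p.2.contains q.2 then (p.1, p.2.erase q.2) else p)))
        (l := fcs) (init := PySem.Dict.ofList rtc)).symm]
    rw [pvAfold_items]
    rw [show (fcs.map (fun fc => (fc.2, fc.1))).map (·.1) = fcs.map (·.2) from by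
      rw [List.map_map]; rfl]
    rw [show (fcs.map (fun fc => (fc.2, fc.1))).map (·.2) = fcs.map (·.1) from by
      rw [List.map_map]; rfl]
    refine congrArg _ ?_ |>.trans (List.map_congr_left ?_)
    · exact List.filter_congr (fun p _ => by rw [PySem.Dict.contains_counter])
    · intro p _
      rw [pvPrune_eq_foldl_erase]

-- ===== VERDICT (by name: the statement is the Claim_ definition above) =====
theorem trim_rules_spec : Claim_equal_trim_rules := by
  intro fcs ctr rtc _
  exact trim_rules_eq_alt fcs ctr rtc
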